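-- pv_equiv track=rewrite | github.com/Caerii/assemblies | research/experiments/applications/test_multiclause_coordination.py | _extract_clauses_from_coordinated
-- ===== SOURCE A (Python) =====
-- from typing import Dict, List, Any, Optional, Tuple
--
-- def _extract_clauses_from_coordinated(
--     words: List[str], conjunction: str,
-- ) -> List[List[str]]:
--     """Split a coordinated sentence into individual clauses by conjunction."""
--     clauses = []
--     current = []
--     for w in words:
--         if w == conjunction:
--             if current:
--                 clauses.append(current)
--             current = []
--         else:
--             current.append(w)
--     if current:
--         clauses.append(current)
--     return clauses
-- ===== SOURCE B (Python) =====
-- from typing import List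
--
-- def _extract_clauses_from_coordinated(
--     words: List[str], conjunction: str,
-- ) -> List[List[str]]:
--     """Split a coordinated sentence into individual clauses by conjunction."""
--     n = len(words)
--     seps = [i for i, w in enumerate(words) if w == conjunction]
--     bounds = [-1] + seps + [n]
--     return [words[a + 1:b] for a, b in zip(bounds, bounds[1:]) if b - a > 1]
-- ===== Notes on version B (the rewrite author's own statement) =====
-- stated objective: alternative
-- what changed: Instead of A's one-pass current-buffer/flush loop, B first collects the integer positions of all conjunction occurrences, brackets them with -1 and len(words), and then materialises each clause as a slice words[a+1:b] between consecutive separator positions, keeping only non-empty slices.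
import Mathlib
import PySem

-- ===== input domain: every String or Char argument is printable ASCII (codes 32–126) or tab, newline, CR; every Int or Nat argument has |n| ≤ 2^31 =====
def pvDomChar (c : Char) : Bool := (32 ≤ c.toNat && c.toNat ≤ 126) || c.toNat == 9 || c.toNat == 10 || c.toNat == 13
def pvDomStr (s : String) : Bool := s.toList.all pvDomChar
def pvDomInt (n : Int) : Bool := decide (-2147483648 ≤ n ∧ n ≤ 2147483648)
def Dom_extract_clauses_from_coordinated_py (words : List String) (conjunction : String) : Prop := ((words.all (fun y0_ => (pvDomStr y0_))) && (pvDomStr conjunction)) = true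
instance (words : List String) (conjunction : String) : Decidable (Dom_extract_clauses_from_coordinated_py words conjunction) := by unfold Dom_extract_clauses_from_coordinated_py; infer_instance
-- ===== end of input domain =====

-- B replaces A's one-pass current-buffer/flush loop by a staged computation: collect the
-- positions of the conjunction, bracket them with -1 and len(words), and slice the word
-- list between consecutive separator positions, keeping the non-empty slices (alternative;
-- same cost).

-- ===== PORT A =====
-- loop body: 'if w == conjunction: (flush current into clauses) else: current.append(w)'
def pvStepA (conjunction : String) (st : List (List String) × List String) (w : String) :
    List (List String) × List String :=
  if w == conjunction then
    (if st.2.isEmpty then st.1 else st.1 ++ [st.2], [])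
  else
    (st.1, st.2 ++ [w])

def extract_clauses_from_coordinated_py (words : List String) (conjunction : String) : List (List String) :=
  let st := words.foldl (pvStepA conjunction) ([], [])
  if st.2.isEmpty then st.1 else st.1 ++ [st.2]

-- ===== PORT B =====
-- n = len(words); seps = [i for i, w in enumerate(words) if w == conjunction];
-- bounds = [-1] + seps + [n]; return [words[a+1:b] for a, b in zip(bounds, bounds[1:]) if b - a > 1]
def extract_clauses_from_coordinated_py_alt (words : List String) (conjunction : String) : List (List String) :=
  let n : Int := (words.length : Int)
  let seps : List Int :=
    (PySem.List.enumerate words).filterMap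
      (fun p => if p.2 == conjunction then some p.1 else none)
  let bounds : List Int := [-1] ++ seps ++ [n]
  (bounds.zip (PySem.List.slice bounds (some 1) none)).filterMap
    (fun p => if p.2 - p.1 > 1 then some (PySem.List.slice words (some (p.1 + 1)) (some p.2)) else none)

-- ===== PRECONDITION & SPEC =====
def Spec_extract_clauses_from_coordinated_py (words : List String) (conjunction : String) (out : List (List String)) : Prop := out = extract_clauses_from_coordinated_py_alt words conjunction
instance (words : List String) (conjunction : String) (out : List (List String)) : Decidable (Spec_extract_clauses_from_coordinated_py words conjunction out) := by unfold Spec_extract_clauses_from_coordinated_py; infer_instance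

-- ===== CLAIM (what is proved, stated in full; the proofs are below) =====
def Claim_equal_extract_clauses_from_coordinated_py : Prop := ∀ (words : List String) (conjunction : String), Dom_extract_clauses_from_coordinated_py words conjunction → Spec_extract_clauses_from_coordinated_py words conjunction (extract_clauses_from_coordinated_py words conjunction)

-- ===== LEMMAS AND PROOFS =====

-- Canonical recursive form both ports are reduced to: skip a leading conjunction,
-- otherwise emit the maximal leading run of non-conjunction words.
def pvCanon (c : String) : List String → List (List String)
  | [] => []
  | w :: ws =>
    if w == c then pvCanon c ws
    else (w :: ws.takeWhile (fun x => !(x == c))) :: pvCanon c (ws.dropWhile (fun x => !(x == c)))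
termination_by ws => ws.length
decreasing_by
  all_goals simp only [List.length_cons]
  all_goals first
    | exact Nat.lt_succ_of_le (List.length_dropWhile_le _ _)
    | exact Nat.lt_succ_self _

-- ---------- A = pvCanon ----------

-- A's loop, rewritten with the flushed clauses factored out of the accumulator.
def pvAltAux (conjunction : String) (cur : List String) : List String → List (List String)
  | [] => if cur.isEmpty then [] else [cur]
  | w :: ws =>
    if w == conjunction then
      (if cur.isEmpty then pvAltAux conjunction [] ws else cur :: pvAltAux conjunction [] ws)
    else
      pvAltAux conjunction (cur ++ [w]) ws

theorem foldA_eq_altAux (conjunction : String) (ws : List String) :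
    ∀ (cl : List (List String)) (cur : List String),
      (let st := ws.foldl (pvStepA conjunction) (cl, cur)
       if st.2.isEmpty then st.1 else st.1 ++ [st.2]) = cl ++ pvAltAux conjunction cur ws := by
  induction ws with
  | nil =>
    intro cl cur
    by_cases hc : cur.isEmpty <;> simp [pvAltAux, hc]
  | cons w ws ih =>
    intro cl cur
    simp only [List.foldl_cons]
    by_cases h : (w == conjunction) = true
    · by_cases hc : cur.isEmpty
      · have hc' : cur = [] := by simpa [List.isEmpty_iff] using hc
        subst hc'
        rw [show pvStepA conjunction (cl, []) w = (cl, []) from by simp [pvStepA, h]]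
        rw [ih, pvAltAux]
        simp [h]
      · rw [show pvStepA conjunction (cl, cur) w = (cl ++ [cur], []) from by simp [pvStepA, h, hc]]
        rw [ih, pvAltAux]
        simp [h, hc]
    · rw [show pvStepA conjunction (cl, cur) w = (cl, cur ++ [w]) from by simp [pvStepA, h]]
      rw [ih, pvAltAux]
      simp [h]

theorem altAux_eq_canon (conjunction : String) :
    ∀ (n : Nat) (ws : List String), ws.length ≤ n →
      (pvAltAux conjunction [] ws = pvCanon conjunction ws ∧
       ∀ cur : List String, cur ≠ [] →
         pvAltAux conjunction cur ws =
           (cur ++ ws.takeWhile (fun x => !(x == conjunction))) ::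
             pvCanon conjunction (ws.dropWhile (fun x => !(x == conjunction)))) := by
  intro n
  induction n with
  | zero =>
    intro ws hws
    have : ws = [] := List.eq_nil_of_length_eq_zero (Nat.le_zero.mp hws)
    subst this
    constructor
    · simp [pvAltAux, pvCanon]
    · intro cur hcur
      simp [pvAltAux, pvCanon, List.isEmpty_iff, hcur]
  | succ n ih =>
    intro ws hws
    cases ws with
    | nil =>
      constructor
      · simp [pvAltAux, pvCanon]
      · intro cur hcur
        simp [pvAltAux, pvCanon, hcur]
    | cons w ws =>
      have hlen : ws.length ≤ n := Nat.lt_succ_iff.mp hws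
      by_cases h : (w == conjunction) = true
      · have hcn : pvCanon conjunction (w :: ws) = pvCanon conjunction ws := by
          rw [pvCanon, if_pos h]
        constructor
        · simp [pvAltAux, h, hcn, (ih ws hlen).1]
        · intro cur hcur
          rw [pvAltAux, if_pos h, if_neg (by simpa [List.isEmpty_iff] using hcur)]
          simp [h, hcn, (ih ws hlen).1]
      · have hcn : pvCanon conjunction (w :: ws) =
            (w :: ws.takeWhile (fun x => !(x == conjunction))) ::
              pvCanon conjunction (ws.dropWhile (fun x => !(x == conjunction))) := by
          rw [pvCanon, if_neg h]
        constructor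
        · rw [pvAltAux, if_neg h, List.nil_append, ((ih ws hlen).2 [w] (by simp)), hcn]
          simp
        · intro cur hcur
          rw [pvAltAux, if_neg h, ((ih ws hlen).2 (cur ++ [w]) (by simp))]
          simp [Bool.eq_false_iff.mpr h]

theorem A_eq_canon (words : List String) (conjunction : String) :
    extract_clauses_from_coordinated_py words conjunction = pvCanon conjunction words := by
  unfold extract_clauses_from_coordinated_py
  rw [foldA_eq_altAux conjunction words [] []]
  simpa using (altAux_eq_canon conjunction words.length words (le_refl _)).1

-- ---------- B = pvCanon ----------

-- separator positions starting from index s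
def pvSeps (c : String) (s : Int) (ws : List String) : List Int :=
  (PySem.List.enumerate ws s).filterMap (fun p => if p.2 == c then some p.1 else none)

-- emitted slice for a pair of consecutive bounds
def pvEmit (words : List String) (p : Int × Int) : Option (List String) :=
  if p.2 - p.1 > 1 then some (PySem.List.slice words (some (p.1 + 1)) (some p.2)) else none

-- adjacent pairs of a list
def pvAdj (l : List Int) : List (Int × Int) := l.zip l.tail

def pvBody (c : String) (ws : List String) : List (List String) :=
  (pvAdj ((-1 : Int) :: pvSeps c 0 ws ++ [(ws.length : Int)])).filterMap (pvEmit ws)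

theorem alt_eq_body (words : List String) (conjunction : String) :
    extract_clauses_from_coordinated_py_alt words conjunction = pvBody conjunction words := by
  unfold extract_clauses_from_coordinated_py_alt pvBody pvAdj pvSeps pvEmit
  simp only [PySem.List.slice_from_one]
  rfl

theorem seps_cons (c : String) (s : Int) (w : String) (ws : List String) :
    pvSeps c s (w :: ws) = (if w == c then [s] else []) ++ pvSeps c (s + 1) ws := by
  by_cases h : w = c <;>
    simp [pvSeps, PySem.List.enumerate_cons, h]

theorem seps_shift (c : String) (ws : List String) :
    ∀ s : Int, pvSeps c s ws = (pvSeps c 0 ws).map (· + s) := by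
  induction ws with
  | nil => intro s; simp [pvSeps]
  | cons w ws ih =>
    intro s
    rw [seps_cons, seps_cons, ih (s + 1), ih (0 + 1)]
    by_cases h : w = c <;> simp [h, List.map_map] <;> (intro a _; ring)

theorem seps_nil_of_all (c : String) (ws : List String)
    (h : ws.all (fun x => !(x == c))) : ∀ s, pvSeps c s ws = [] := by
  induction ws with
  | nil => intro s; simp [pvSeps]
  | cons w ws ih =>
    intro s
    simp only [List.all_cons, Bool.and_eq_true] at h
    have hw : ¬ w = c := by simpa using h.1
    rw [seps_cons, ih h.2]
    simp [hw]

theorem seps_split (c : String) (pre suf : List String)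
    (h : pre.all (fun x => !(x == c))) : ∀ s : Int,
    pvSeps c s (pre ++ c :: suf) = (s + pre.length) :: pvSeps c (s + pre.length + 1) suf := by
  induction pre with
  | nil => intro s; rw [List.nil_append, seps_cons]; simp
  | cons w pre ih =>
    intro s
    simp only [List.all_cons, Bool.and_eq_true] at h
    have hw : ¬ w = c := by simpa using h.1
    rw [List.cons_append, seps_cons, ih h.2 (s + 1)]
    simp only [List.length_cons]
    push_cast
    rw [show s + 1 + (pre.length : Int) = s + ((pre.length : Int) + 1) from by ring]
    simp [hw]

theorem seps_mem (c : String) (ws : List String) :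
    ∀ (s : Int) (x : Int), x ∈ pvSeps c s ws → s ≤ x ∧ x < s + ws.length := by
  induction ws with
  | nil => intro s x hx; simp [pvSeps] at hx
  | cons w ws ih =>
    intro s x hx
    rw [seps_cons] at hx
    rcases List.mem_append.mp hx with h | h
    · by_cases hw : w = c <;> simp [hw] at h
      subst h
      simp only [List.length_cons]
      push_cast
      omega
    · have := ih (s + 1) x h
      simp only [List.length_cons]
      push_cast
      omega

theorem adj_map (f : Int → Int) (l : List Int) :
    pvAdj (l.map f) = (pvAdj l).map (Prod.map f f) := by
  unfold pvAdj
  rw [← List.map_tail, List.zip_map]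

theorem slice_shift {α : Type} (xs ys : List α) (a b : Int) (ha : 0 ≤ a) (hb : 0 ≤ b) :
    PySem.List.slice (xs ++ ys) (some (a + xs.length)) (some (b + xs.length)) =
      PySem.List.slice ys (some a) (some b) := by
  rw [PySem.List.slice_toNat _ (by omega) (by omega), PySem.List.slice_toNat _ ha hb]
  have h2 : (b + xs.length).toNat - (a + xs.length).toNat = b.toNat - a.toNat := by omega
  have h1 : (a + xs.length).toNat = xs.length + a.toNat := by omega
  rw [h2, h1]
  simp [List.drop_append, List.drop_eq_nil_of_le (by omega : xs.length ≤ xs.length + a.toNat)]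

theorem body_nosep (c : String) (ws : List String)
    (h : ws.all (fun x => !(x == c))) :
    pvBody c ws = if ws.isEmpty then [] else [ws] := by
  unfold pvBody
  rw [seps_nil_of_all c ws h 0]
  cases ws with
  | nil => simp [pvAdj, pvEmit]
  | cons w ws =>
    have hadj : pvAdj ((-1 : Int) :: ([] : List Int) ++ [(((w :: ws).length : Nat) : Int)]) =
        [((-1 : Int), (((w :: ws).length : Nat) : Int))] := rfl
    rw [hadj]
    rw [List.filterMap_cons]
    rw [show pvEmit (w :: ws) ((-1 : Int), (((w :: ws).length : Nat) : Int)) =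
        some (w :: ws) from ?_]
    · simp
    · unfold pvEmit
      rw [if_pos (by simp only [List.length_cons]; push_cast; omega)]
      rw [show ((-1 : Int) + 1) = 0 from by ring]
      simp only [PySem.List.slice_zero_start]
      rw [PySem.List.slice_to _ (by positivity)]
      simp


theorem adj_cons (x y : Int) (l : List Int) (l' : List Int) (hl : l = y :: l') :
    pvAdj (x :: l) = (x, y) :: pvAdj l := by subst hl; rfl

theorem body_split (c : String) (pre suf : List String)
    (h : pre.all (fun x => !(x == c))) :
    pvBody c (pre ++ c :: suf) = (if pre.isEmpty then [] else [pre]) ++ pvBody c suf := by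
  unfold pvBody
  have hn : (((pre ++ c :: suf).length : Nat) : Int) = (suf.length : Int) + ((pre.length : Int) + 1) := by
    simp only [List.length_append, List.length_cons]
    push_cast
    ring
  rw [seps_split c pre suf h 0, seps_shift c suf (0 + pre.length + 1), hn]
  simp only [zero_add, List.cons_append]
  have hb : ((pre.length : Int)) ::
        (List.map (fun x => x + ((pre.length : Int) + 1)) (pvSeps c 0 suf) ++
          [(suf.length : Int) + ((pre.length : Int) + 1)]) =
      List.map (fun x => x + ((pre.length : Int) + 1))
        ((-1 : Int) :: pvSeps c 0 suf ++ [(suf.length : Int)]) := by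
    simp only [List.map_cons, List.map_append, List.map_nil]
    congr 1
    ring
  rw [hb]
  rw [adj_cons (-1) ((-1 : Int) + ((pre.length : Int) + 1))
        (List.map (fun x => x + ((pre.length : Int) + 1))
          ((-1 : Int) :: pvSeps c 0 suf ++ [(suf.length : Int)]))
        (List.map (fun x => x + ((pre.length : Int) + 1))
          (pvSeps c 0 suf ++ [(suf.length : Int)]))
        (by simp)]
  rw [adj_map, List.filterMap_cons, List.filterMap_map]
  have hmem : ∀ q ∈ pvAdj ((-1 : Int) :: pvSeps c 0 suf ++ [(suf.length : Int)]),
      -1 ≤ q.1 ∧ 0 ≤ q.2 ∧ q.2 ≤ (suf.length : Int) := by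
    intro q hq
    obtain ⟨h1, h2⟩ := List.of_mem_zip (a := q.1) (b := q.2) (by simpa [pvAdj] using hq)
    refine ⟨?_, ?_, ?_⟩
    · rcases List.mem_cons.mp h1 with h1 | h1
      · omega
      · rcases List.mem_append.mp h1 with h1 | h1
        · have := seps_mem c suf 0 q.1 h1; omega
        · simp at h1; omega
    · rcases List.mem_append.mp h2 with h2 | h2
      · have := seps_mem c suf 0 q.2 h2; omega
      · simp at h2; omega
    · rcases List.mem_append.mp h2 with h2 | h2
      · have := seps_mem c suf 0 q.2 h2; omega
      · simp at h2; omega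
  have hcongr : ∀ q ∈ pvAdj ((-1 : Int) :: pvSeps c 0 suf ++ [(suf.length : Int)]),
      (pvEmit (pre ++ c :: suf) ∘
        Prod.map (fun x => x + ((pre.length : Int) + 1)) (fun x => x + ((pre.length : Int) + 1))) q =
        pvEmit suf q := by
    intro q hq
    obtain ⟨hq1, hq2, hq3⟩ := hmem q hq
    rcases q with ⟨a, b⟩
    have ha' : -1 ≤ a := hq1
    have hb' : 0 ≤ b := hq2
    have hb'' : b ≤ (suf.length : Int) := hq3
    show (if b + ((pre.length : Int) + 1) - (a + ((pre.length : Int) + 1)) > 1 then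
        some (PySem.List.slice (pre ++ c :: suf)
          (some (a + ((pre.length : Int) + 1) + 1)) (some (b + ((pre.length : Int) + 1))))
      else none) =
      (if b - a > 1 then some (PySem.List.slice suf (some (a + 1)) (some b)) else none)
    rw [show b + ((pre.length : Int) + 1) - (a + ((pre.length : Int) + 1)) = b - a from by ring]
    by_cases hc : b - a > 1
    · rw [if_pos hc, if_pos hc]
      have hfull : pre ++ c :: suf = (pre ++ [c]) ++ suf := by simp
      have hlen : ((pre.length : Int) + 1) = (((pre ++ [c]).length : Nat) : Int) := by simp
      rw [show a + ((pre.length : Int) + 1) + 1 = (a + 1) + ((pre.length : Int) + 1) from by ring]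
      rw [hfull, hlen, slice_shift (pre ++ [c]) suf (a + 1) b (by omega) (by omega)]
    · rw [if_neg hc, if_neg hc]
  rw [List.filterMap_congr hcongr]
  -- head pair
  cases pre with
  | nil =>
    rw [show pvEmit ([] ++ c :: suf)
          ((-1 : Int), (-1 : Int) + (((List.length ([] : List String) : Nat) : Int) + 1)) = none from by
      simp [pvEmit]]
    simp
  | cons w pre' =>
    rw [show pvEmit ((w :: pre') ++ c :: suf)
          ((-1 : Int), (-1 : Int) + ((((w :: pre').length : Nat) : Int) + 1)) =
        some (w :: pre') from ?_]
    · simp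
    · unfold pvEmit
      rw [if_pos (by simp only [List.length_cons]; push_cast; omega)]
      rw [show ((-1 : Int) + 1) = 0 from by ring]
      rw [show ((-1 : Int) + ((((w :: pre').length : Nat) : Int) + 1)) = (((w :: pre').length : Nat) : Int) from by ring]
      simp only [PySem.List.slice_zero_start]
      rw [PySem.List.slice_to _ (by positivity)]
      simp

theorem dropWhile_head_false {α : Type} (p : α → Bool) (l : List α) (r : α) (rest : List α)
    (h : l.dropWhile p = r :: rest) : p r = false := by
  induction l with
  | nil => simp at h
  | cons x xs ih =>
    rw [List.dropWhile_cons] at h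
    by_cases hx : p x = true
    · rw [if_pos hx] at h; exact ih h
    · rw [if_neg hx] at h
      injection h with h1 _
      subst h1
      exact Bool.eq_false_iff.mpr hx

set_option maxHeartbeats 1000000 in
theorem body_eq_canon (c : String) :
    ∀ (n : Nat) (ws : List String), ws.length ≤ n → pvBody c ws = pvCanon c ws := by
  intro n
  induction n with
  | zero =>
    intro ws hws
    have : ws = [] := List.eq_nil_of_length_eq_zero (Nat.le_zero.mp hws)
    subst this
    simp [body_nosep c [] (by simp), pvCanon]
  | succ n ih =>
    intro ws hws
    cases ws with
    | nil =>
      rw [body_nosep c [] (by simp), show pvCanon c [] = [] from by rw [pvCanon]]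
      simp
    | cons w ws =>
      have hlen : ws.length ≤ n := Nat.lt_succ_iff.mp hws
      by_cases h : (w == c) = true
      · have hw : w = c := by simpa using h
        rw [hw]
        calc pvBody c (c :: ws) = pvBody c ([] ++ c :: ws) := by rw [List.nil_append]
          _ = (if ([] : List String).isEmpty then [] else [([] : List String)]) ++ pvBody c ws :=
              body_split c [] ws (by simp)
          _ = pvCanon c ws := by simp [ih ws hlen]
          _ = pvCanon c (c :: ws) := by rw [pvCanon, if_pos (by simp)]
      · cases hrest : ws.dropWhile (fun x => !(x == c)) with
        | nil =>
          have htk : ws.takeWhile (fun x => !(x == c)) = ws := by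
            have := List.takeWhile_append_dropWhile (p := fun x => !(x == c)) (l := ws)
            rw [hrest, List.append_nil] at this
            exact this
          have hwb : (w == c) = false := Bool.eq_false_iff.mpr h
          have hall : (w :: ws).all (fun x => !(x == c)) := by
            simp only [List.all_cons, hwb, Bool.not_false, Bool.true_and]
            rw [← htk]
            simp
          rw [body_nosep c (w :: ws) hall, pvCanon, if_neg h, htk, hrest]
          simp [pvCanon]
        | cons r rest =>
          have hr : r = c := by
            have := dropWhile_head_false (fun x => !(x == c)) ws r rest hrest
            simpa using this
          rw [hr] at hrest
          have hdecomp : w :: ws = (w :: ws.takeWhile (fun x => !(x == c))) ++ c :: rest := by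
            rw [List.cons_append]
            congr 1
            rw [← hrest]
            exact (List.takeWhile_append_dropWhile).symm
          have hwb : (w == c) = false := Bool.eq_false_iff.mpr h
          have hall : (w :: ws.takeWhile (fun x => !(x == c))).all (fun x => !(x == c)) := by
            simp [hwb]
          have hlrest : rest.length ≤ n := by
            have h1 : (c :: rest).length ≤ ws.length := by
              rw [← hrest]; exact List.length_dropWhile_le _ _
            simp only [List.length_cons] at h1
            omega
          have hcanon_rest : pvCanon c (ws.dropWhile (fun x => !(x == c))) = pvCanon c rest := by
            rw [hrest, pvCanon, if_pos (by simp)]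
          calc pvBody c (w :: ws)
              = pvBody c ((w :: ws.takeWhile (fun x => !(x == c))) ++ c :: rest) := by
                rw [← hdecomp]
            _ = (if (w :: ws.takeWhile (fun x => !(x == c))).isEmpty then []
                  else [w :: ws.takeWhile (fun x => !(x == c))]) ++ pvBody c rest :=
                body_split c _ rest hall
            _ = (w :: ws.takeWhile (fun x => !(x == c))) :: pvCanon c rest := by
                rw [ih rest hlrest]; rfl
            _ = (w :: ws.takeWhile (fun x => !(x == c))) ::
                  pvCanon c (ws.dropWhile (fun x => !(x == c))) := by rw [hcanon_rest]
            _ = pvCanon c (w :: ws) := by rw [pvCanon, if_neg h]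

-- ===== VERDICT (by name: the statement is the Claim_ definition above) =====
theorem extract_clauses_from_coordinated_py_spec : Claim_equal_extract_clauses_from_coordinated_py := by
  intro words conjunction _
  unfold Spec_extract_clauses_from_coordinated_py
  rw [A_eq_canon, alt_eq_body]
  exact (body_eq_canon conjunction words.length words (le_refl _)).symm
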